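-- pv_equiv track=rewrite | github.com/RmnJL/nexora-storm | storm_resolver_scanner.py | _limit_prefix24
-- ===== SOURCE A (Python) =====
-- def _prefix24_key(ip: str) -> str:
--     parts = str(ip).split(".")
--     if len(parts) != 4:
--         return ""
--     return ".".join(parts[:3])
--
-- def _limit_prefix24(items: list[str], max_per_prefix24: int) -> list[str]:
--     cap = int(max_per_prefix24)
--     if cap <= 0:
--         return list(items)
--     out: list[str] = []
--     counts: dict[str, int] = {}
--     for ip in items:
--         prefix = _prefix24_key(ip)
--         if not prefix:
--             continue
--         cur = counts.get(prefix, 0)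
--         if cur >= cap:
--             continue
--         counts[prefix] = cur + 1
--         out.append(ip)
--     if len(out) >= len(items):
--         return out
--     # Backfill without prefix cap so pool size can still be reached.
--     seen = set(out)
--     for ip in items:
--         if ip in seen:
--             continue
--         out.append(ip)
--     return out
-- ===== SOURCE B (Python) =====
-- def _prefix24_key(ip: str) -> str:
--     parts = str(ip).split(".")
--     if len(parts) != 4:
--         return ""
--     return ".".join(parts[:3])
--
-- def _limit_prefix24(items: list[str], max_per_prefix24: int) -> list[str]:
--     cap = int(max_per_prefix24)
--     if cap <= 0:
--         return list(items)
--     # Stage 1: group the positions of every prefix.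
--     ps = [_prefix24_key(ip) for ip in items]
--     groups: dict[str, list[int]] = {}
--     for i, p in enumerate(ps):
--         groups.setdefault(p, []).append(i)
--     # Stage 2: keep the first `cap` positions of each valid (/24) group.
--     keep = {i for p, idxs in groups.items() if p for i in idxs[:cap]}
--     kept = [ip for i, ip in enumerate(items) if i in keep]
--     if len(kept) >= len(items):
--         return kept
--     # Backfill with the values not already present.
--     seen = set(kept)
--     return kept + [ip for ip in items if ip not in seen]
-- ===== Notes on version B (the rewrite author's own statement) =====
-- stated objective: alternative
-- what changed: B replaces A's streaming per-prefix capped counter by a staged grouping algorithm: it first groups the positions of every /24 prefix into lists, then keeps the items at the first cap positions of each valid group, then backfills from the missing values; no running counter is maintained.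
import Mathlib
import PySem

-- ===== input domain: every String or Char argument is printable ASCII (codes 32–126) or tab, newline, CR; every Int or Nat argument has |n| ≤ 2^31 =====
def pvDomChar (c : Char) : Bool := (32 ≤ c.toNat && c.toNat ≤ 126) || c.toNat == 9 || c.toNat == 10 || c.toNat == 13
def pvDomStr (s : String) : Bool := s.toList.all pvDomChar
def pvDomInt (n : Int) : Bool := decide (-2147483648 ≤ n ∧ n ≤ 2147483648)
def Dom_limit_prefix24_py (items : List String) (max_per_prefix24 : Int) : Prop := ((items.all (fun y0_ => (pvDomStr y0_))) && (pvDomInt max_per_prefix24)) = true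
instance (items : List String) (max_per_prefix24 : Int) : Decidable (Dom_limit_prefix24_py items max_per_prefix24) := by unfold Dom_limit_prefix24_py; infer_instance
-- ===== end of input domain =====

-- B replaces A's streaming capped counter by a staged algorithm: group positions by /24 prefix,
-- keep the first `cap` positions of each valid group, then backfill; same return value (alternative, not faster).

-- ===== PORT A =====
-- _prefix24_key, shared helper (identical in Source A and Source B)
def prefix24_key_py (ip : String) : String :=
  -- sep "." is nonempty, so split? always returns some: getD [] is exact here
  let parts := (PySem.Str.split? ip ".").getD []
  if parts.length ≠ 4 then ""
  else PySem.Str.join "." (parts.take 3)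

-- body of A's first for-loop
def pvStepA (cap : Int) (st : List String × PySem.Dict String Int) (ip : String) :
    List String × PySem.Dict String Int :=
  let pfx := prefix24_key_py ip
  if pfx = "" then st
  else
    let cur := st.2.getD pfx 0
    if cur ≥ cap then st
    else (st.1 ++ [ip], st.2.insert pfx (cur + 1))

def limit_prefix24_py (items : List String) (max_per_prefix24 : Int) : List String :=
  let cap := max_per_prefix24
  if cap ≤ 0 then items
  else
    let r := items.foldl (pvStepA cap) ([], PySem.Dict.empty)
    let out := r.1
    if out.length ≥ items.length then out
    else
      let seen : PySem.Set String := PySem.Set.ofList out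
      items.foldl (fun acc ip => if PySem.Set.contains seen ip then acc else acc ++ [ip]) out

-- ===== PORT B =====
-- groups = {}; for i, p in enumerate(ps): groups.setdefault(p, []).append(i)
-- (setdefault+append sets groups[p] to groups.get(p, []) + [i]: Dict.modify is exact)
def pvGroups (ps : List String) : PySem.Dict String (List Int) :=
  ((PySem.List.enumerate ps).map (fun q => (q.2, q.1))).foldl
    (fun d pr => d.modify pr.1 [] (fun v => v ++ [pr.2])) PySem.Dict.empty

-- keep = {i for p, idxs in groups.items() if p for i in idxs[:cap]}
def pvKeep (ps : List String) (cap : Int) : PySem.Set Int :=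
  PySem.Set.ofList ((pvGroups ps).items.flatMap
    (fun pr => if pr.1 ≠ "" then PySem.List.slice pr.2 none (some cap) else []))

def limit_prefix24_py_alt (items : List String) (max_per_prefix24 : Int) : List String :=
  let cap := max_per_prefix24
  if cap ≤ 0 then items
  else
    let ps := items.map prefix24_key_py
    let keep := pvKeep ps cap
    let kept := ((PySem.List.enumerate items).filter (fun q => PySem.Set.contains keep q.1)).map (fun q => q.2)
    if kept.length ≥ items.length then kept
    else
      let seen : PySem.Set String := PySem.Set.ofList kept
      kept ++ items.filter (fun ip => !(PySem.Set.contains seen ip))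

-- ===== PRECONDITION & SPEC =====
def Spec_limit_prefix24_py (items : List String) (max_per_prefix24 : Int) (out : List String) : Prop := out = limit_prefix24_py_alt items max_per_prefix24
instance (items : List String) (max_per_prefix24 : Int) (out : List String) : Decidable (Spec_limit_prefix24_py items max_per_prefix24 out) := by unfold Spec_limit_prefix24_py; infer_instance

-- ===== CLAIM =====
def Claim_equal_limit_prefix24_py : Prop := ∀ (items : List String) (max_per_prefix24 : Int), Dom_limit_prefix24_py items max_per_prefix24 → Spec_limit_prefix24_py items max_per_prefix24 (limit_prefix24_py items max_per_prefix24)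

-- ===== LEMMAS AND PROOFS =====

-- number of elements of l whose /24 prefix is p
def pvCnt (l : List String) (p : String) : Nat := (l.map prefix24_key_py).count p

-- reference: the kept list, recursing on the remaining items with the processed prefix as accumulator
def pvKeptAux (cap : Int) (pre : List String) : List String → List String
  | [] => []
  | x :: xs =>
    if prefix24_key_py x ≠ "" ∧ ((pvCnt pre (prefix24_key_py x) : Int) < cap)
    then x :: pvKeptAux cap (pre ++ [x]) xs
    else pvKeptAux cap (pre ++ [x]) xs

-- positions (from start s) of the elements of ps equal to p
def pvGIdx (p : String) : List String → Int → List Int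
  | [], _ => []
  | x :: xs, s => if x = p then s :: pvGIdx p xs (s + 1) else pvGIdx p xs (s + 1)

theorem pvKeptAux_cons (cap : Int) (pre : List String) (x : String) (xs : List String) :
    pvKeptAux cap pre (x :: xs)
      = if prefix24_key_py x ≠ "" ∧ ((pvCnt pre (prefix24_key_py x) : Int) < cap)
        then x :: pvKeptAux cap (pre ++ [x]) xs
        else pvKeptAux cap (pre ++ [x]) xs := rfl

theorem pvCnt_append_singleton (pre : List String) (x : String) (p : String) :
    pvCnt (pre ++ [x]) p = pvCnt pre p + (if prefix24_key_py x = p then 1 else 0) := by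
  simp only [pvCnt, List.map_append, List.map_cons, List.map_nil, List.count_append]
  split_ifs with h <;> simp [h]

theorem pvGIdx_eq (p : String) (ps : List String) (s : Int) :
    ((((PySem.List.enumerate ps s).map (fun q => (q.2, q.1))).filter
        (fun pr => pr.1 == p)).map (fun pr => pr.2)) = pvGIdx p ps s := by
  induction ps generalizing s with
  | nil => simp [PySem.List.enumerate_nil, pvGIdx]
  | cons x xs ih =>
    rw [PySem.List.enumerate_cons]
    by_cases hx : x = p
    · simp [pvGIdx, hx, ih]
    · simp [pvGIdx, hx, ih]

theorem pvGIdx_ge (p : String) (ps : List String) (s : Int) (j : Int)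
    (hj : j ∈ pvGIdx p ps s) : s ≤ j := by
  induction ps generalizing s with
  | nil => simp [pvGIdx] at hj
  | cons x xs ih =>
    unfold pvGIdx at hj
    split at hj
    · rcases List.mem_cons.mp hj with h | h
      · omega
      · have := ih (s + 1) h; omega
    · have := ih (s + 1) hj; omega

theorem pvGIdx_take_mem (p : String) (ps : List String) (s : Int) (m c : Nat) :
    (s + (m : Int)) ∈ (pvGIdx p ps s).take c ↔
      (m < ps.length ∧ ps.getD m "" = p ∧ (ps.take m).count p < c) := by
  induction ps generalizing s m c with
  | nil => simp [pvGIdx]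
  | cons x xs ih =>
    by_cases hx : x = p
    · cases c with
      | zero => simp
      | succ c' =>
        unfold pvGIdx
        rw [if_pos hx]
        cases m with
        | zero =>
          simp [hx]
        | succ m' =>
          have hne : s + ((m' + 1 : Nat) : Int) ≠ s := by push_cast; omega
          have hstep : s + ((m' + 1 : Nat) : Int) = (s + 1) + (m' : Int) := by push_cast; ring
          rw [List.take_succ_cons, List.mem_cons]
          simp only [hne, false_or]
          rw [hstep, ih]
          simp [hx]
    · unfold pvGIdx
      rw [if_neg hx]
      cases m with
      | zero =>
        constructor
        · intro h
          have := pvGIdx_ge p xs (s + 1) _ (List.mem_of_mem_take h)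
          omega
        · intro h
          exact absurd (show x = p by simpa using h.2.1) hx
      | succ m' =>
        have hstep : s + ((m' + 1 : Nat) : Int) = (s + 1) + (m' : Int) := by push_cast; ring
        rw [hstep, ih]
        simp [hx]

theorem pvGroups_getD (ps : List String) (p : String) :
    (pvGroups ps).getD p [] = pvGIdx p ps 0 := by
  unfold pvGroups
  rw [PySem.Dict.getD_foldl_modify_append, PySem.Dict.getD_empty, List.nil_append, pvGIdx_eq]

theorem pvGroups_keys (ps : List String) : (pvGroups ps).keys = PySem.Set.ofList ps := by
  unfold pvGroups
  rw [PySem.Dict.keys_foldl_modify_key _ Prod.fst [] (fun _ pr => fun v => v ++ [pr.2])]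
  rw [PySem.Dict.keys_empty, PySem.Set.update_nil_left, List.map_map]
  have : ((fun pr : String × Int => pr.1) ∘ fun q : Int × String => (q.2, q.1))
      = fun q : Int × String => q.2 := rfl
  rw [this, PySem.List.map_snd_enumerate]

theorem pvGroups_keys_nodup (ps : List String) : (pvGroups ps).keys.Nodup := by
  unfold pvGroups
  exact PySem.Dict.nodup_keys_foldl_modify_key _ Prod.fst [] _ _ (by simp [PySem.Dict.keys_empty])

theorem pvKeep_mem (ps : List String) (cap : Int) (hcap : 0 ≤ cap) (j : Int) :
    (PySem.Set.contains (pvKeep ps cap) j = true) ↔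
      ∃ p ∈ ps, p ≠ "" ∧ j ∈ (pvGIdx p ps 0).take cap.toNat := by
  unfold pvKeep
  rw [PySem.Set.contains_iff, PySem.Set.mem_ofList, List.mem_flatMap]
  constructor
  · rintro ⟨pr, hpr, hj⟩
    rw [PySem.Dict.items_eq_map_keys _ (pvGroups_keys_nodup ps) []] at hpr
    rcases List.mem_map.mp hpr with ⟨k, hk, rfl⟩
    rw [pvGroups_keys, PySem.Set.mem_ofList] at hk
    by_cases hne : k ≠ ""
    · refine ⟨k, hk, hne, ?_⟩
      rw [if_pos hne, PySem.List.slice_to _ hcap, pvGroups_getD] at hj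
      exact hj
    · rw [if_neg hne] at hj; simp at hj
  · rintro ⟨p, hp, hne, hj⟩
    refine ⟨(p, (pvGroups ps).getD p []), ?_, ?_⟩
    · rw [PySem.Dict.items_eq_map_keys _ (pvGroups_keys_nodup ps) []]
      exact List.mem_map.mpr ⟨p, by rw [pvGroups_keys, PySem.Set.mem_ofList]; exact hp, rfl⟩
    · rw [if_pos hne, PySem.List.slice_to _ hcap, pvGroups_getD]
      exact hj

theorem pv_getD_append_cons {α : Type} (A : List α) (b : α) (B : List α) (d : α) :
    (A ++ b :: B).getD A.length d = b := by
  induction A with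
  | nil => rfl
  | cons a A _ => simp

-- the condition at the head of the remaining list, read off pvKeep
theorem pvKeep_contains_head (pre : List String) (x : String) (rest : List String)
    (cap : Int) (hcap : 0 < cap) :
    (PySem.Set.contains (pvKeep ((pre ++ x :: rest).map prefix24_key_py) cap)
        ((pre.length : Nat) : Int) = true) ↔
      (prefix24_key_py x ≠ "" ∧ ((pvCnt pre (prefix24_key_py x) : Int) < cap)) := by
  set ps := (pre ++ x :: rest).map prefix24_key_py with hps
  have hlen : pre.length = (pre.map prefix24_key_py).length := by simp
  have hsplit : ps = pre.map prefix24_key_py ++ prefix24_key_py x :: rest.map prefix24_key_py := by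
    simp [hps]
  have hget : ps.getD pre.length "" = prefix24_key_py x := by
    rw [hsplit, hlen, pv_getD_append_cons]
  have htake : ps.take pre.length = pre.map prefix24_key_py := by
    rw [hsplit, hlen, List.take_left]
  have hlt : pre.length < ps.length := by simp [hps]
  rw [pvKeep_mem ps cap (le_of_lt hcap), show ((pre.length : Nat) : Int) = 0 + (pre.length : Int) by ring]
  constructor
  · rintro ⟨p, _, hne, hmem⟩
    rw [pvGIdx_take_mem] at hmem
    obtain ⟨_, hp, hcnt⟩ := hmem
    rw [hget] at hp
    subst hp
    rw [htake] at hcnt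
    refine ⟨hne, ?_⟩
    have hcv : pvCnt pre (prefix24_key_py x) = (pre.map prefix24_key_py).count (prefix24_key_py x) := rfl
    omega
  · rintro ⟨hne, hcnt⟩
    refine ⟨prefix24_key_py x, ?_, hne, ?_⟩
    · rw [hsplit]; exact List.mem_append_right _ (List.mem_cons_self)
    · rw [pvGIdx_take_mem]
      refine ⟨hlt, hget, ?_⟩
      rw [htake]
      have hcv : pvCnt pre (prefix24_key_py x) = (pre.map prefix24_key_py).count (prefix24_key_py x) := rfl
      omega

-- B's kept list equals the reference
theorem pvB_kept_eq (items : List String) (cap : Int) (hcap : 0 < cap) :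
    ∀ (l pre : List String), pre ++ l = items →
      (((PySem.List.enumerate l ((pre.length : Nat) : Int)).filter
          (fun q => PySem.Set.contains (pvKeep (items.map prefix24_key_py) cap) q.1)).map
        (fun q => q.2)) = pvKeptAux cap pre l := by
  intro l
  induction l with
  | nil => intro pre _; simp [PySem.List.enumerate_nil, pvKeptAux]
  | cons x xs ih =>
    intro pre hpre
    rw [PySem.List.enumerate_cons, List.filter_cons]
    have hcond := pvKeep_contains_head pre x xs cap hcap
    rw [show pre ++ x :: xs = items from hpre] at hcond
    have hnext : ((pre.length : Nat) : Int) + 1 = (((pre ++ [x]).length : Nat) : Int) := by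
      push_cast [List.length_append, List.length_cons, List.length_nil]
      omega
    have hrec := ih (pre ++ [x]) (by simpa using hpre)
    rw [pvKeptAux_cons]
    by_cases h : prefix24_key_py x ≠ "" ∧ ((pvCnt pre (prefix24_key_py x) : Int) < cap)
    · rw [if_pos (hcond.mpr h), if_pos h]
      simp only [List.map_cons]
      rw [hnext, hrec]
    · rw [if_neg (fun hc => h (hcond.mp hc)), if_neg h, hnext, hrec]

-- A's first loop equals the reference
theorem pvA_out_eq (cap : Int) :
    ∀ (l pre k : List String) (m : PySem.Dict String Int),
      (∀ p : String, p ≠ "" → m.getD p 0 = min ((pvCnt pre p : Nat) : Int) cap) →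
      (l.foldl (pvStepA cap) (k, m)).1 = k ++ pvKeptAux cap pre l := by
  intro l
  induction l with
  | nil => intro pre k m _; simp [pvKeptAux]
  | cons x xs ih =>
    intro pre k m hinv
    rw [List.foldl_cons]
    by_cases h0 : prefix24_key_py x = ""
    · have hstep : pvStepA cap (k, m) x = (k, m) := by simp [pvStepA, h0]
      have hkept : pvKeptAux cap pre (x :: xs) = pvKeptAux cap (pre ++ [x]) xs := by
        rw [pvKeptAux_cons, if_neg (by simp [h0])]
      rw [hstep, hkept]
      apply ih
      intro p hp
      rw [pvCnt_append_singleton, if_neg (fun he => hp (h0 ▸ he.symm))]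
      simpa using hinv p hp
    · have hcur := hinv _ h0
      by_cases hge : m.getD (prefix24_key_py x) 0 ≥ cap
      · have hc : ¬ ((pvCnt pre (prefix24_key_py x) : Int) < cap) := by omega
        have hstep : pvStepA cap (k, m) x = (k, m) := by simp [pvStepA, h0, hge]
        have hkept : pvKeptAux cap pre (x :: xs) = pvKeptAux cap (pre ++ [x]) xs := by
          rw [pvKeptAux_cons, if_neg (by tauto)]
        rw [hstep, hkept]
        apply ih
        intro p hp
        rw [pvCnt_append_singleton]
        by_cases hpq : prefix24_key_py x = p
        · rw [if_pos hpq, hinv p hp, ← hpq]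
          push_cast
          omega
        · rw [if_neg hpq]
          simpa using hinv p hp
      · have hc : (pvCnt pre (prefix24_key_py x) : Int) < cap := by omega
        have hstep : pvStepA cap (k, m) x
            = (k ++ [x], m.insert (prefix24_key_py x) (m.getD (prefix24_key_py x) 0 + 1)) := by
          simp [pvStepA, h0, hge]
        have hkept : pvKeptAux cap pre (x :: xs) = x :: pvKeptAux cap (pre ++ [x]) xs := by
          rw [pvKeptAux_cons, if_pos ⟨h0, hc⟩]
        rw [hstep, hkept]
        have hinv' : ∀ p : String, p ≠ "" →
            (m.insert (prefix24_key_py x) (m.getD (prefix24_key_py x) 0 + 1)).getD p 0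
              = min ((pvCnt (pre ++ [x]) p : Nat) : Int) cap := by
          intro p hp
          rw [PySem.Dict.getD_insert, pvCnt_append_singleton]
          by_cases hpq : p = prefix24_key_py x
          · rw [if_pos hpq, hpq, hcur, if_pos rfl]
            push_cast
            omega
          · rw [if_neg hpq, if_neg (fun he => hpq he.symm)]
            simpa using hinv p hp
        rw [ih (pre ++ [x]) (k ++ [x]) _ hinv', List.append_assoc]
        rfl

-- A's backfill loop appends the items missing from seen
theorem pv_backfill_eq (seen : PySem.Set String) (l : List String) (acc : List String) :
    l.foldl (fun acc ip => if PySem.Set.contains seen ip then acc else acc ++ [ip]) acc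
      = acc ++ l.filter (fun ip => !(PySem.Set.contains seen ip)) := by
  have hfun : (fun (acc : List String) ip => if PySem.Set.contains seen ip then acc else acc ++ [ip])
      = fun acc ip => if (!(PySem.Set.contains seen ip)) = true then acc ++ [ip] else acc := by
    funext acc ip
    cases h : PySem.Set.contains seen ip <;> simp
  rw [hfun, PySem.List.foldl_append_if]
  simp

-- ===== VERDICT =====
theorem limit_prefix24_py_spec : Claim_equal_limit_prefix24_py := by
  intro items cap _
  unfold Spec_limit_prefix24_py limit_prefix24_py limit_prefix24_py_alt
  by_cases hc : cap ≤ 0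
  · simp [hc]
  · have hcap : 0 < cap := by omega
    simp only [hc, if_false]
    have hA : (items.foldl (pvStepA cap) ([], PySem.Dict.empty)).1 = pvKeptAux cap [] items := by
      have := pvA_out_eq cap items [] [] PySem.Dict.empty ?_
      · simpa using this
      · intro p _
        rw [PySem.Dict.getD_empty]
        have h0' : pvCnt [] p = 0 := rfl
        rw [h0']
        simp only [Nat.cast_zero]
        omega
    have hB := pvB_kept_eq items cap hcap items [] rfl
    simp only [List.length_nil, Nat.cast_zero] at hB
    simp only [hA, hB]
    split
    · rfl
    · rw [pv_backfill_eq]
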